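-- pv_equiv track=rewrite | github.com/msgerasyov/simple_reg_ex | simple_reg_ex.py | get_all_possible_p
-- ===== SOURCE A (Python) =====
-- def get_all_possible_p(p):
--     count = 0
--     res = []
--     for i in range(len(p)):
--         if p[i] == '?':
--             count += 1
--
--     for i in range(2**count):
--         mask = list(map(int, str(bin(i))[2:].zfill(count)))
--         s = []
--         k = 0
--         for j in range(len(p)):
--             if p[j] == '?':
--                 if not mask[k]:
--                     s.pop()
--                 k += 1
--             else:
--                 s.append(p[j])
--
--         res.append("".join(s))
--
--     return res
-- ===== SOURCE B (Python) =====
-- def get_all_possible_p(p):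
--     states = [[]]  # ordered partial stacks; a '?' expands each into (delete, keep)
--     for ch in p:
--         if ch == '?':
--             states = [t for s in states for t in (s[:-1], s)]
--         else:
--             for s in states:
--                 s.append(ch)
--     return ["".join(s) for s in states]
-- ===== Notes on version B (the rewrite author's own statement) =====
-- stated objective: alternative
-- what changed: Replaced the enumerate-all-bitmasks loop (bin/zfill string mask plus a full rescan of the pattern per mask) by a single left-to-right pass that maintains the ordered list of partial stacks, expanding each into (delete, keep) at every '?', which reproduces the binary-counting order without ever building a mask.
-- outside the precondition, e.g. on get_all_possible_p('?'): A raises IndexError, B returns ['', '']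
import Mathlib
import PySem

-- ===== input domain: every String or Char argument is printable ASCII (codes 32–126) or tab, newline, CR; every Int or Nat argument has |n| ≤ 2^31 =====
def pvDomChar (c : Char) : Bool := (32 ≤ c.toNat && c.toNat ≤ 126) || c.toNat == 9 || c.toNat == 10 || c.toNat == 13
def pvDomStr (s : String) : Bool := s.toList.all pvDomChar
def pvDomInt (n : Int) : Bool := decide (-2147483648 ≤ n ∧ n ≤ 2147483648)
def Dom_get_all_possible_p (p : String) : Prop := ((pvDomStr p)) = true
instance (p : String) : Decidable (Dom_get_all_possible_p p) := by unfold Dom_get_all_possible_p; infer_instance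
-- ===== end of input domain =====

-- B replaces A's bitmask enumeration (bin/zfill mask + full rescan per mask) by one recursive
-- walk over the pattern branching at each '?' (delete before keep); objective: simpler, same cost.


-- ===== PORT A =====
-- first loop of A: count the '?' characters by scanning range(len(p)) (p[i] always in range)
def pvCountA (pl : List Char) : Nat :=
  (List.range pl.length).foldl (fun c i => if pl.getD i ' ' = '?' then c + 1 else c) 0

-- str(bin(i))[2:] for i > 0: big-endian binary digits (empty for 0)
def pvBinAux (n : Nat) : List Nat :=
  if h : n = 0 then [] else pvBinAux (n / 2) ++ [n % 2]
termination_by n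
decreasing_by exact Nat.div_lt_self (Nat.pos_of_ne_zero h) one_lt_two

-- str(bin(i))[2:]  (bin(0) = '0b0', so [0] for i = 0)
def pvBinStr (i : Nat) : List Nat := if i = 0 then [0] else pvBinAux i

-- .zfill(count): left-pad with zeros to length count (never truncates)
def pvZfill (c : Nat) (l : List Nat) : List Nat := List.replicate (c - l.length) 0 ++ l

-- the body of A's inner 'for j in range(len(p))' loop; state = (s or raised, k);
-- 'none' models the IndexError of s.pop() on an empty list (excluded by Pre_)
def pvStepA (mask : List Nat) : (Option (List Char) × Nat) → Char → (Option (List Char) × Nat)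
  | (st, k), ch =>
    if ch = '?' then
      (if mask.getD k 0 = 0 then
         (match st with
          | some s =>
              match PySem.List.pop? s (-1) with
              | some (_, s') => some s'
              | none => none
          | none => none)
       else st, k + 1)
    else (st.map (fun s => s ++ [ch]), k)

-- "".join(s), with "" for the raised state (unreachable under Pre_: Python raised IndexError)
def pvJoinA : Option (List Char) → String
  | some s => String.mk s
  | none => ""

def get_all_possible_p (p : String) : List String :=
  let pl := p.toList
  let count := pvCountA pl
  (List.range (2 ^ count)).foldl
    (fun res i =>
      let mask := pvZfill count (pvBinStr i)
      res ++ [pvJoinA (pl.foldl (pvStepA mask) (some ([] : List Char), 0)).1])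
    []

-- ===== PORT B =====
-- one step of B's single pass: a '?' expands each partial stack into (delete, keep),
-- any other character is appended to every stack
def pvStepB (states : List (List Char)) (ch : Char) : List (List Char) :=
  if ch = '?' then states.flatMap (fun s => [s.dropLast, s])
  else states.map (fun s => s ++ [ch])

def get_all_possible_p_alt (p : String) : List String :=
  (p.toList.foldl pvStepB [[]]).map String.mk

-- ===== PRECONDITION & SPEC =====
-- Pre_ excludes exactly the patterns on which A raises IndexError (some '?' is reached with an
-- empty stack on the all-delete mask, i.e. its prefix has no more non-'?' than '?' characters).
def Pre_get_all_possible_p (p : String) : Prop :=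
  ∀ j < p.toList.length, p.toList.getD j ' ' = '?' →
    (p.toList.take j).count '?' < ((p.toList.take j).filter (· ≠ '?')).length

instance (p : String) : Decidable (Pre_get_all_possible_p p) := by
  unfold Pre_get_all_possible_p; infer_instance

def pvWitness_get_all_possible_p : String := "a?b?"

def Spec_get_all_possible_p (p : String) (out : List String) : Prop := out = get_all_possible_p_alt p
instance (p : String) (out : List String) : Decidable (Spec_get_all_possible_p p out) := by unfold Spec_get_all_possible_p; infer_instance

-- ===== CLAIM (what is proved, stated in full; the proofs are below) =====
def Claim_equal_get_all_possible_p : Prop := ∀ (p : String), Dom_get_all_possible_p p → Pre_get_all_possible_p p → Spec_get_all_possible_p p (get_all_possible_p p)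

-- ===== LEMMAS AND PROOFS =====

-- spec-side binary digits: c-long big-endian bits of i
def pvBitsOf : Nat → Nat → List Nat
  | 0, _ => []
  | c + 1, i => i / 2 ^ c :: pvBitsOf c (i % 2 ^ c)

-- A's inner loop, mask consumed from the front
def pvRunC : List Char → List Nat → List Char → Option (List Char)
  | [], _, s => some s
  | ch :: rest, m, s =>
    if ch = '?' then
      if m.headD 0 = 0 then
        match s with
        | [] => none
        | _ :: _ => pvRunC rest m.tail s.dropLast
      else pvRunC rest m.tail s
    else pvRunC rest m (s ++ [ch])

-- no-raise invariant on the remaining pattern, given the current stack length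
def pvOk : List Char → Nat → Prop
  | [], _ => True
  | ch :: rest, n => if ch = '?' then 1 ≤ n ∧ pvOk rest (n - 1) else pvOk rest (n + 1)

lemma pvFoldl_congr {α β : Type} (f g : α → β → α) (l : List β)
    (h : ∀ x ∈ l, ∀ acc, f acc x = g acc x) : ∀ acc, l.foldl f acc = l.foldl g acc := by
  induction l with
  | nil => intro acc; rfl
  | cons x xs ih =>
      intro acc
      simp only [List.foldl, h x (by simp)]
      exact ih (fun y hy acc => h y (by simp [hy]) acc) _

lemma pvFoldlAppendMap {α β : Type} (g : β → α) (l : List β) (acc : List α) :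
    l.foldl (fun r i => r ++ [g i]) acc = acc ++ l.map g := by
  induction l generalizing acc with
  | nil => simp
  | cons x xs ih => simp [List.foldl, ih]

lemma pvCountA_aux (pl : List Char) :
    ∀ (g : Nat → Char → Nat) (a : Nat),
      (List.range pl.length).foldl (fun c i => g c (pl.getD i ' ')) a = pl.foldl g a := by
  induction pl using List.reverseRecOn with
  | nil => intro g a; rfl
  | append_singleton xs x ih =>
      intro g a
      rw [List.length_append, List.length_cons, List.length_nil, List.range_succ,
        List.foldl_append, List.foldl_append]
      have hcongr : (List.range xs.length).foldl (fun c i => g c ((xs ++ [x]).getD i ' ')) a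
          = (List.range xs.length).foldl (fun c i => g c (xs.getD i ' ')) a := by
        apply pvFoldl_congr
        intro i hi acc
        rw [List.getD_append _ _ _ _ (List.mem_range.1 hi)]
      rw [hcongr, ih]
      simp [List.foldl]

lemma pvCountA_eq (pl : List Char) : pvCountA pl = pl.count '?' := by
  rw [pvCountA, pvCountA_aux pl (fun c ch => if ch = '?' then c + 1 else c) 0]
  suffices hgen : ∀ (l : List Char) (a : Nat),
      l.foldl (fun c ch => if ch = '?' then c + 1 else c) a = a + l.count '?' by
    simpa using hgen pl 0
  intro l
  induction l with
  | nil => intro a; simp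
  | cons ch rest ih =>
      intro a
      by_cases hch : ch = '?'
      · subst hch
        simp only [List.foldl, ih, List.count_cons, beq_self_eq_true, if_true]
        omega
      · have hb : (ch == '?') = false := by simpa using hch
        simp only [List.foldl, if_neg hch, ih, List.count_cons, hb]
        simp

lemma pvBitsOf_zero (c : Nat) : pvBitsOf c 0 = List.replicate c 0 := by
  induction c with
  | zero => rfl
  | succ c ih => simp [pvBitsOf, ih, List.replicate_succ]

lemma pvBinAux_length (c i : Nat) (h : i < 2 ^ c) : (pvBinAux i).length ≤ c := by
  induction c generalizing i with
  | zero =>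
      interval_cases i
      simp [pvBinAux]
  | succ c ih =>
      by_cases h0 : i = 0
      · subst h0; simp [pvBinAux]
      · rw [pvBinAux, dif_neg h0]
        have hd : i / 2 < 2 ^ c := Nat.div_lt_of_lt_mul (by rw [pow_succ] at h; omega)
        have := ih _ hd
        simp only [List.length_append, List.length_cons, List.length_nil]
        omega

lemma pvBitsOf_snoc (c i : Nat) (h : i < 2 ^ (c + 1)) :
    pvBitsOf (c + 1) i = pvBitsOf c (i / 2) ++ [i % 2] := by
  induction c generalizing i with
  | zero =>
      simp only [pvBitsOf, pow_zero, Nat.div_one, List.nil_append]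
      have : i < 2 := h
      interval_cases i <;> rfl
  | succ c ih =>
      have hmod : i % 2 ^ (c + 1) < 2 ^ (c + 1) := Nat.mod_lt _ (by positivity)
      rw [pvBitsOf, ih _ hmod, pvBitsOf]
      have h1 : i / 2 / 2 ^ c = i / 2 ^ (c + 1) := by
        rw [Nat.div_div_eq_div_mul, pow_succ, mul_comm]
      have h2 : i / 2 % 2 ^ c = i % 2 ^ (c + 1) / 2 := by
        rw [← Nat.mod_mul_right_div_self, ← pow_succ']
      have h3 : i % 2 ^ (c + 1) % 2 = i % 2 :=
        Nat.mod_mod_of_dvd i (dvd_pow_self 2 (by omega))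
      rw [h1, h2, h3]
      simp

lemma pvZfill_binAux (c i : Nat) (h : i < 2 ^ c) :
    pvZfill c (pvBinAux i) = pvBitsOf c i := by
  induction c generalizing i with
  | zero =>
      interval_cases i
      simp [pvBinAux, pvZfill, pvBitsOf]
  | succ c ih =>
      by_cases h0 : i = 0
      · subst h0
        simp [pvBinAux, pvZfill, pvBitsOf_zero]
      · rw [pvBinAux, dif_neg h0]
        have hdiv : i / 2 < 2 ^ c := Nat.div_lt_of_lt_mul (by rw [pow_succ] at h; omega)
        have hlen : (pvBinAux (i / 2)).length ≤ c := pvBinAux_length c _ hdiv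
        have hz : pvZfill (c + 1) (pvBinAux (i / 2) ++ [i % 2])
            = pvZfill c (pvBinAux (i / 2)) ++ [i % 2] := by
          simp only [pvZfill, List.length_append, List.length_cons, List.length_nil]
          have : c + 1 - ((pvBinAux (i / 2)).length + 1) = c - (pvBinAux (i / 2)).length := by omega
          rw [this, List.append_assoc]
        rw [hz, ih _ hdiv, ← pvBitsOf_snoc c i h]

lemma pvZfill_binStr (c i : Nat) (hc : 1 ≤ c) (h : i < 2 ^ c) :
    pvZfill c (pvBinStr i) = pvBitsOf c i := by
  by_cases h0 : i = 0
  · subst h0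
    rw [pvBinStr, if_pos rfl, pvBitsOf_zero]
    obtain ⟨c', rfl⟩ : ∃ c', c = c' + 1 := ⟨c - 1, by omega⟩
    simp [pvZfill, List.replicate_succ']
  · rw [pvBinStr, if_neg h0]; exact pvZfill_binAux c i h

-- with no '?' in the pattern the mask is never inspected
lemma pvRunC_no_q (pl : List Char) (h : pl.count '?' = 0) (m m' : List Nat) (s : List Char) :
    pvRunC pl m s = pvRunC pl m' s := by
  induction pl generalizing s with
  | nil => rfl
  | cons ch rest ih =>
      by_cases hch : ch = '?'
      · subst hch; simp at h
      · simp only [List.count_cons] at h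
        simp only [pvRunC, if_neg hch]
        exact ih (by simpa [hch] using h) _

lemma pvPopNil : PySem.List.pop? ([] : List Char) (-1) = none := by
  simp [PySem.List.pop?]

lemma pvPopSnd (x : Char) (xs : List Char) :
    (match PySem.List.pop? (x :: xs) (-1) with
     | some (_, s') => some s'
     | none => (none : Option (List Char))) = some ((x :: xs).dropLast) := by
  have hne : (x :: xs : List Char) ≠ [] := by simp
  have hdec : ∃ ys y, x :: xs = ys ++ [y] :=
    ⟨(x :: xs).dropLast, (x :: xs).getLast hne, (List.dropLast_concat_getLast hne).symm⟩
  obtain ⟨ys, y, heq⟩ := hdec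
  rw [heq, PySem.List.pop?_last]
  simp

lemma pvStepA_q_none (mask : List Nat) (k : Nat) :
    pvStepA mask ((none : Option (List Char)), k) '?' = (none, k + 1) := by
  simp [pvStepA]

lemma pvStepA_q_zero (mask : List Nat) (k : Nat) (s : List Char) (h : mask.getD k 0 = 0) :
    pvStepA mask (some s, k) '?'
      = ((match PySem.List.pop? s (-1) with
          | some (_, s') => some s'
          | none => (none : Option (List Char))), k + 1) := by
  have h' : mask[k]?.getD 0 = 0 := by rw [← List.getD_eq_getElem?_getD]; exact h
  simp [pvStepA, h']

lemma pvStepA_q_one (mask : List Nat) (k : Nat) (s : List Char) (h : ¬ mask.getD k 0 = 0) :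
    pvStepA mask (some s, k) '?' = (some s, k + 1) := by
  have h' : ¬ mask[k]?.getD 0 = 0 := by rw [← List.getD_eq_getElem?_getD]; exact h
  simp [pvStepA, h']

lemma pvStepA_other (mask : List Nat) (k : Nat) (st : Option (List Char)) (ch : Char)
    (h : ch ≠ '?') : pvStepA mask (st, k) ch = (st.map (fun s => s ++ [ch]), k) := by
  simp [pvStepA, h]

lemma pvRunC_q (rest : List Char) (m : List Nat) (s : List Char) :
    pvRunC ('?' :: rest) m s
      = if m.headD 0 = 0 then
          (match s with
           | [] => none
           | _ :: _ => pvRunC rest m.tail s.dropLast)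
        else pvRunC rest m.tail s := by
  simp [pvRunC]

lemma pvRunC_other (ch : Char) (rest : List Char) (m : List Nat) (s : List Char)
    (h : ch ≠ '?') : pvRunC (ch :: rest) m s = pvRunC rest m (s ++ [ch]) := by
  simp [pvRunC, h]

lemma pvFoldlA_none (pl : List Char) (mask : List Nat) (k : Nat) :
    (pl.foldl (pvStepA mask) ((none : Option (List Char)), k)).1 = none := by
  induction pl generalizing k with
  | nil => rfl
  | cons ch rest ih =>
      by_cases hch : ch = '?'
      · subst hch
        rw [List.foldl_cons, pvStepA_q_none]
        exact ih _
      · rw [List.foldl_cons, pvStepA_other mask k _ ch hch, Option.map_none]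
        exact ih _

lemma pvHeadD_drop (mask : List Nat) (k : Nat) :
    (mask.drop k).headD 0 = mask.getD k 0 := by
  rw [List.headD_eq_head?_getD, List.head?_drop, List.getD_eq_getElem?_getD]

lemma pvFoldlA_eq_runC (pl : List Char) (mask : List Nat) (s : List Char) (k : Nat) :
    (pl.foldl (pvStepA mask) (some s, k)).1 = pvRunC pl (mask.drop k) s := by
  induction pl generalizing s k with
  | nil => rfl
  | cons ch rest ih =>
      by_cases hch : ch = '?'
      · subst hch
        have htail : (mask.drop k).tail = mask.drop (k + 1) := List.tail_drop
        rw [pvRunC_q, pvHeadD_drop]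
        by_cases hbit : mask.getD k 0 = 0
        · rw [if_pos hbit]
          cases s with
          | nil =>
              rw [List.foldl_cons, pvStepA_q_zero mask k [] hbit, pvPopNil]
              exact pvFoldlA_none rest mask (k + 1)
          | cons x xs =>
              rw [List.foldl_cons, pvStepA_q_zero mask k (x :: xs) hbit, pvPopSnd]
              rw [ih _ _, htail]
        · rw [if_neg hbit, List.foldl_cons, pvStepA_q_one mask k s hbit, ih _ _, htail]
      · rw [List.foldl_cons, pvStepA_other mask k _ ch hch, Option.map_some,
          pvRunC_other ch rest _ s hch]
        exact ih _ _

lemma pvOk_q (rest : List Char) (n : Nat) :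
    pvOk ('?' :: rest) n = (1 ≤ n ∧ pvOk rest (n - 1)) := by
  simp only [pvOk, reduceIte]

lemma pvOk_other (ch : Char) (rest : List Char) (n : Nat) (h : ch ≠ '?') :
    pvOk (ch :: rest) n = pvOk rest (n + 1) := by
  simp only [pvOk]; rw [if_neg h]

-- proof-side: the tree of final stacks produced from one partial stack
def pvExp : List Char → List Char → List (List Char)
  | [], s => [s]
  | ch :: rest, s =>
    if ch = '?' then pvExp rest s.dropLast ++ pvExp rest s
    else pvExp rest (s ++ [ch])

lemma pvFoldB (pl : List Char) (S : List (List Char)) :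
    pl.foldl pvStepB S = S.flatMap (pvExp pl) := by
  induction pl generalizing S with
  | nil => simp [pvExp]
  | cons ch rest ih =>
      by_cases hch : ch = '?'
      · subst hch
        rw [List.foldl_cons,
          show pvStepB S '?' = S.flatMap (fun s => [s.dropLast, s]) from by simp [pvStepB],
          ih, List.flatMap_assoc]
        congr 1
        funext s
        simp [pvExp]
      · rw [List.foldl_cons,
          show pvStepB S ch = S.map (fun s => s ++ [ch]) from by simp [pvStepB, hch],
          ih, List.flatMap_map]
        congr 1
        funext s
        simp [pvExp, hch]

lemma pvAlt_eq (p : String) :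
    get_all_possible_p_alt p = (pvExp p.toList []).map String.mk := by
  rw [get_all_possible_p_alt, pvFoldB]
  simp

lemma pvOk_mono (pl : List Char) (n m : Nat) (h : pvOk pl n) (hnm : n ≤ m) : pvOk pl m := by
  induction pl generalizing n m with
  | nil => trivial
  | cons ch rest ih =>
      by_cases hch : ch = '?'
      · subst hch
        rw [pvOk_q] at h ⊢
        obtain ⟨h1, h2⟩ := h
        exact ⟨by omega, ih _ _ h2 (by omega)⟩
      · rw [pvOk_other ch rest _ hch] at h ⊢
        exact ih _ _ h (by omega)

lemma pvMain (pl : List Char) (s : List Char) (hok : pvOk pl s.length) :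
    (pvExp pl s).map String.mk
      = (List.range (2 ^ pl.count '?')).map
          (fun i => pvJoinA (pvRunC pl (pvBitsOf (pl.count '?') i) s)) := by
  induction pl generalizing s with
  | nil => simp [pvExp, pvRunC, pvJoinA]
  | cons ch rest ih =>
      by_cases hch : ch = '?'
      · subst hch
        rw [pvOk_q] at hok
        obtain ⟨hlen, hokd⟩ := hok
        have hne : s ≠ [] := by intro hs; subst hs; simp at hlen
        have hcnt : ('?' :: rest).count '?' = rest.count '?' + 1 := by simp
        set c := rest.count '?' with hc
        have hpow : 2 ^ (c + 1) = 2 ^ c + 2 ^ c := by rw [pow_succ]; omega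
        rw [hcnt, hpow, List.range_add, List.map_append, List.map_map]
        have hfirst : (List.range (2 ^ c)).map
              (fun i => pvJoinA (pvRunC ('?' :: rest) (pvBitsOf (c + 1) i) s))
            = (List.range (2 ^ c)).map
              (fun i => pvJoinA (pvRunC rest (pvBitsOf c i) s.dropLast)) := by
          apply List.map_congr_left
          intro i hi
          have hilt : i < 2 ^ c := List.mem_range.1 hi
          have hb : pvBitsOf (c + 1) i = 0 :: pvBitsOf c i := by
            rw [pvBitsOf, Nat.div_eq_of_lt hilt, Nat.mod_eq_of_lt hilt]
          rw [hb]
          cases s with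
          | nil => exact absurd rfl hne
          | cons x xs => simp [pvRunC]
        have hsecond : (List.range (2 ^ c)).map
              ((fun i => pvJoinA (pvRunC ('?' :: rest) (pvBitsOf (c + 1) i) s)) ∘
                (fun i => 2 ^ c + i))
            = (List.range (2 ^ c)).map
              (fun i => pvJoinA (pvRunC rest (pvBitsOf c i) s)) := by
          apply List.map_congr_left
          intro i hi
          have hilt : i < 2 ^ c := List.mem_range.1 hi
          have hdiv : (2 ^ c + i) / 2 ^ c = 1 := by
            rw [Nat.add_comm, Nat.add_div_right _ (by positivity), Nat.div_eq_of_lt hilt]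
          have hmod : (2 ^ c + i) % 2 ^ c = i := by
            rw [Nat.add_comm, Nat.add_mod_right, Nat.mod_eq_of_lt hilt]
          simp only [Function.comp_apply]
          rw [pvBitsOf, hdiv, hmod]
          simp [pvRunC]
        rw [hfirst, hsecond, pvExp, if_pos rfl, List.map_append]
        have hlend : s.dropLast.length = s.length - 1 := by simp
        rw [← ih s.dropLast (by rw [hlend]; exact hokd),
          ← ih s (pvOk_mono _ _ _ hokd (by omega))]
      · have hcnt : (ch :: rest).count '?' = rest.count '?' := by
          simp [hch]
        have hok' : pvOk rest (s ++ [ch]).length := by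
          rw [pvOk_other ch rest _ hch] at hok
          simpa using hok
        rw [hcnt]
        have hcong : (List.range (2 ^ rest.count '?')).map
              (fun i => pvJoinA (pvRunC (ch :: rest) (pvBitsOf (rest.count '?') i) s))
            = (List.range (2 ^ rest.count '?')).map
              (fun i => pvJoinA (pvRunC rest (pvBitsOf (rest.count '?') i) (s ++ [ch]))) := by
          apply List.map_congr_left
          intro i _
          simp [pvRunC, hch]
        rw [hcong, pvExp, if_neg hch, ih _ hok']

lemma pvPre_ok (pl : List Char) (n : Nat)
    (h : ∀ j < pl.length, pl.getD j ' ' = '?' →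
      (pl.take j).count '?' < n + ((pl.take j).filter (· ≠ '?')).length) :
    pvOk pl n := by
  induction pl generalizing n with
  | nil => trivial
  | cons ch rest ih =>
      by_cases hch : ch = '?'
      · subst hch
        have h0 := h 0 (by simp) (by simp)
        simp only [List.take_zero, List.count_nil, List.filter_nil, List.length_nil] at h0
        rw [pvOk_q]
        refine ⟨by omega, ih (n - 1) ?_⟩
        intro j hj hgd
        have hj1 := h (j + 1) (by simp; omega) (by simpa using hgd)
        simp only [List.take_succ_cons, List.count_cons, List.filter_cons] at hj1
        simp only [if_pos rfl, beq_self_eq_true, if_true] at hj1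
        have : (decide ('?' ≠ '?')) = false := by simp
        rw [this] at hj1
        simp only [Bool.false_eq_true, if_false] at hj1
        omega
      · rw [pvOk_other ch rest _ hch]
        refine ih (n + 1) ?_
        intro j hj hgd
        have hj1 := h (j + 1) (by simp; omega) (by simpa using hgd)
        simp only [List.take_succ_cons, List.count_cons, List.filter_cons] at hj1
        have hb : (ch == '?') = false := by simpa using hch
        have hd : (decide (ch ≠ '?')) = true := by simpa using hch
        rw [hb, hd] at hj1
        simp only [Bool.false_eq_true, if_false, if_true, List.length_cons] at hj1
        omega

-- ===== VERDICT (by name: the statement is the Claim_ definition above) =====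
theorem get_all_possible_p_spec : Claim_equal_get_all_possible_p := by
  intro p _ hpre
  unfold Spec_get_all_possible_p get_all_possible_p
  rw [pvAlt_eq]
  simp only []
  set pl := p.toList with hpl
  set count := pvCountA pl with hcount
  have hceq : count = pl.count '?' := pvCountA_eq pl
  rw [pvFoldlAppendMap (fun i =>
      pvJoinA (pl.foldl (pvStepA (pvZfill count (pvBinStr i))) (some ([] : List Char), 0)).1)
      (List.range (2 ^ count)) []]
  rw [List.nil_append]
  have hok : pvOk pl 0 := by
    apply pvPre_ok
    intro j hj hgd
    have h2 := hpre j hj hgd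
    rw [← hpl] at h2
    omega
  rw [pvMain pl [] (by simpa using hok)]
  rw [← hceq]
  apply (List.map_congr_left _).symm
  intro i hi
  have hilt : i < 2 ^ count := List.mem_range.1 hi
  rw [pvFoldlA_eq_runC pl (pvZfill count (pvBinStr i)) [] 0, List.drop_zero]
  by_cases hc0 : count = 0
  · rw [pvRunC_no_q pl (by omega) (pvBitsOf count i) (pvZfill count (pvBinStr i)) ([] : List Char)]
  · rw [pvZfill_binStr count i (by omega) hilt]
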